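-- pv_equiv track=rewrite | github.com/shengquan-ni/Schoolproj | ics33/quiz/q4helper/q4solution.py | min_key_order
-- ===== SOURCE A (Python) =====
-- def min_key_order(adict):
--     if len(adict)<1:
--         return
--     temp,flag=sorted(adict.items())[0],True
--     yield temp
--     while flag:
--         flag=False
--         for i in sorted(adict.items()):
--             if i>temp:
--                 temp=i
--                 flag=True
--                 yield temp
--                 break
-- ===== SOURCE B (Python) =====
-- def min_key_order(adict):
--     yield from sorted(adict.items())
-- ===== Notes on version B (the rewrite author's own statement) =====
-- stated objective: faster
-- what changed: B sorts the items once and yields them in order, instead of A's loop that re-sorts the whole dict and rescans it for the successor of the last yielded item before every single yield.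
import Mathlib
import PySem

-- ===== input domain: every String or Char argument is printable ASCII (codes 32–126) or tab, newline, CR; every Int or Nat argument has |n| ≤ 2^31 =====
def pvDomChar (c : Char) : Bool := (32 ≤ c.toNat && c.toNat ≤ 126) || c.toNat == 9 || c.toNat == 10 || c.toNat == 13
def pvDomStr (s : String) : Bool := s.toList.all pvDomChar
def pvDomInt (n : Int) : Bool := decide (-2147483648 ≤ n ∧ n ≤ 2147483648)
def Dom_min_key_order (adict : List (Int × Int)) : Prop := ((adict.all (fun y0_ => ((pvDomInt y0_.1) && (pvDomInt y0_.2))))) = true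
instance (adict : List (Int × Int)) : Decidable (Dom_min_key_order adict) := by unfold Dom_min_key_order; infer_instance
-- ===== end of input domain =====

-- B replaces A's per-yield full re-sort-and-rescan of the dict by one sort of the
-- items, yielded in order (a timing run measures B faster; return value only,
-- neither version mutates its argument).

-- ===== PORT A =====

-- Python tuple comparison 'i > temp' on (int, int) pairs: lexicographic
def pvPairGt (i temp : Int × Int) : Bool :=
  decide (temp.1 < i.1 ∨ (temp.1 = i.1 ∧ temp.2 < i.2))

-- the 'while flag' loop: each round re-sorts adict.items() and scans it for the
-- first i > temp ('for … if i>temp: … break' = find?); fuel bounds the rounds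
-- (the loop yields strictly increasing items of the dict, so d.size rounds suffice)
def pvAWhile (d : PySem.Dict Int Int) : Nat → (Int × Int) → List (Int × Int)
  | 0, _ => []
  | fuel + 1, temp =>
      match (PySem.List.sorted2 d.items Prod.fst Prod.snd).find? (fun i => pvPairGt i temp) with
      | some i => i :: pvAWhile d fuel i
      | none => []

def min_key_order (adict : List (Int × Int)) : List (Int × Int) :=
  let d := PySem.Dict.ofList adict
  if d.size < 1 then []
  else
    match PySem.List.sorted2 d.items Prod.fst Prod.snd with
    | [] => []  -- unreachable totality guard for sorted(adict.items())[0]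
    | temp :: _ => temp :: pvAWhile d d.size temp

-- ===== PORT B =====
def min_key_order_alt (adict : List (Int × Int)) : List (Int × Int) :=
  PySem.List.sorted2 (PySem.Dict.ofList adict).items Prod.fst Prod.snd

-- ===== PRECONDITION & SPEC =====
def Spec_min_key_order (adict : List (Int × Int)) (out : List (Int × Int)) : Prop := out = min_key_order_alt adict
instance (adict : List (Int × Int)) (out : List (Int × Int)) : Decidable (Spec_min_key_order adict out) := by unfold Spec_min_key_order; infer_instance

-- ===== CLAIM (what is proved, stated in full; the proofs are below) =====
def Claim_equal_min_key_order : Prop := ∀ (adict : List (Int × Int)), Dom_min_key_order adict → Spec_min_key_order adict (min_key_order adict)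

-- ===== LEMMAS AND PROOFS =====

-- lexicographic strict order on pairs, as a Prop
def pvLexLt (a b : Int × Int) : Prop := a.1 < b.1 ∨ (a.1 = b.1 ∧ a.2 < b.2)

-- non-strict companion
def pvLexLe (a b : Int × Int) : Prop := a.1 < b.1 ∨ (a.1 = b.1 ∧ a.2 ≤ b.2)

lemma pvPairGt_iff (i temp : Int × Int) : pvPairGt i temp = true ↔ pvLexLt temp i := by
  simp [pvPairGt, pvLexLt]

-- the comparator sorted2 uses on fst/snd keys is exactly pvLexLt
lemma pvComparator_eq (a b : Int × Int) :
    (decide (a.1 < b.1) || !decide (b.1 < a.1) && decide (a.2 < b.2)) = true ↔ pvLexLt a b := by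
  unfold pvLexLt
  simp only [Bool.or_eq_true, Bool.and_eq_true, Bool.not_eq_true', decide_eq_true_eq,
    decide_eq_false_iff_not]
  omega

lemma pvInsertBy_pairwise (x : Int × Int) (acc : List (Int × Int))
    (h : acc.Pairwise pvLexLe)
    (lt : Int × Int → Int × Int → Bool)
    (hlt : ∀ a b, lt a b = true ↔ pvLexLt a b) :
    (PySem.List.insertBy lt x acc).Pairwise pvLexLe := by
  induction acc with
  | nil => simp [PySem.List.insertBy]
  | cons y ys ih =>
      rw [List.pairwise_cons] at h
      by_cases hxy : lt x y = true
      · rw [PySem.List.insertBy, if_pos hxy]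
        have hxyP : pvLexLe x y := by
          have := (hlt x y).1 hxy; unfold pvLexLt at this; unfold pvLexLe; omega
        refine List.Pairwise.cons ?_ (List.Pairwise.cons h.1 h.2)
        intro z hz
        rcases List.mem_cons.1 hz with rfl | hz
        · exact hxyP
        · have := h.1 z hz
          unfold pvLexLe at *; omega
      · rw [PySem.List.insertBy, if_neg hxy]
        refine List.Pairwise.cons ?_ (ih h.2)
        intro z hz
        rcases (PySem.List.mem_insertBy lt x z ys).1 hz with hzx | hz
        · subst hzx
          have : ¬ pvLexLt z y := fun hc => hxy ((hlt z y).2 hc)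
          unfold pvLexLt at this; unfold pvLexLe; omega
        · exact h.1 z hz

lemma pvFoldl_insertBy_pairwise (xs acc : List (Int × Int))
    (h : acc.Pairwise pvLexLe)
    (lt : Int × Int → Int × Int → Bool)
    (hlt : ∀ a b, lt a b = true ↔ pvLexLt a b) :
    (xs.foldl (fun acc x => PySem.List.insertBy lt x acc) acc).Pairwise pvLexLe := by
  induction xs generalizing acc with
  | nil => exact h
  | cons x xs ih => exact ih _ (pvInsertBy_pairwise x acc h lt hlt)

lemma pvSorted2_pairwise_le (xs : List (Int × Int)) :
    (PySem.List.sorted2 xs Prod.fst Prod.snd).Pairwise pvLexLe := by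
  unfold PySem.List.sorted2
  exact pvFoldl_insertBy_pairwise xs [] (by simp) _ pvComparator_eq

-- with distinct first components, the non-strict pairwise order is strict
lemma pvPairwise_lt_of_le_of_nodup (s : List (Int × Int))
    (hle : s.Pairwise pvLexLe) (hnd : (s.map Prod.fst).Nodup) :
    s.Pairwise pvLexLt := by
  rw [List.nodup_iff_pairwise_ne, List.pairwise_map] at hnd
  refine (hle.and hnd).imp ?_
  rintro a b ⟨h1, h2⟩
  unfold pvLexLe at h1; unfold pvLexLt
  omega

-- on a strictly increasing list, the first element greater than s[k] is s[k+1]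
lemma pvFind_gt (s pre suf : List (Int × Int)) (temp : Int × Int)
    (hs : s.Pairwise pvLexLt) (hsplit : s = pre ++ temp :: suf) :
    s.find? (fun i => pvPairGt i temp) = suf.head? := by
  subst hsplit
  induction pre with
  | nil =>
      rw [List.nil_append] at *
      rw [List.pairwise_cons] at hs
      rw [List.find?_cons]
      have hnt : pvPairGt temp temp = false := by
        simp [pvPairGt]
      rw [hnt]
      cases suf with
      | nil => simp
      | cons t rest =>
          rw [List.find?_cons]
          have : pvPairGt t temp = true := (pvPairGt_iff t temp).2 (hs.1 t (by simp))
          rw [this]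
          simp
  | cons p ps ih =>
      rw [List.cons_append, List.pairwise_cons] at hs
      rw [List.cons_append, List.find?_cons]
      have hpt : pvPairGt p temp = false := by
        have hplt : pvLexLt p temp := hs.1 temp (by simp)
        rw [Bool.eq_false_iff]
        intro hc
        have := (pvPairGt_iff p temp).1 hc
        unfold pvLexLt at *; omega
      rw [hpt]
      exact ih hs.2

-- the while loop reproduces the suffix after temp of the sorted list
lemma pvAWhile_eq (d : PySem.Dict Int Int)
    (hs : (PySem.List.sorted2 d.items Prod.fst Prod.snd).Pairwise pvLexLt) :
    ∀ (suf : List (Int × Int)) (fuel : Nat) (pre : List (Int × Int)) (temp : Int × Int),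
      PySem.List.sorted2 d.items Prod.fst Prod.snd = pre ++ temp :: suf →
      suf.length ≤ fuel → pvAWhile d fuel temp = suf := by
  intro suf
  induction suf with
  | nil =>
      intro fuel pre temp hsplit _
      cases fuel with
      | zero => rfl
      | succ n =>
          rw [pvAWhile, pvFind_gt _ pre [] temp hs hsplit]
          rfl
  | cons t rest ih =>
      intro fuel pre temp hsplit hlen
      cases fuel with
      | zero => simp at hlen
      | succ n =>
          rw [pvAWhile, pvFind_gt _ pre (t :: rest) temp hs hsplit]
          simp only [List.head?_cons]
          have : pre ++ temp :: t :: rest = (pre ++ [temp]) ++ t :: rest := by simp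
          rw [ih n (pre ++ [temp]) t (by rw [hsplit, this]) (by simpa using Nat.le_of_succ_le_succ hlen)]

-- ===== VERDICT (by name: the statement is the Claim_ definition above) =====
theorem min_key_order_spec : Claim_equal_min_key_order := by
  intro adict _
  unfold Spec_min_key_order min_key_order min_key_order_alt
  cases hse : PySem.List.sorted2 (PySem.Dict.ofList adict).items Prod.fst Prod.snd with
  | nil => simp only [hse]; split <;> rfl
  | cons temp suf =>
      have hperm : (PySem.List.sorted2 (PySem.Dict.ofList adict).items Prod.fst Prod.snd).Perm
          (PySem.Dict.ofList adict).items := PySem.List.sorted2_perm _ _ _ _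
      have hlen := hperm.length_eq
      rw [hse] at hlen
      simp only [List.length_cons] at hlen
      have hsz : ¬ (PySem.Dict.ofList adict).size < 1 := by
        unfold PySem.Dict.size; omega
      rw [if_neg hsz]
      have hnd : ((PySem.List.sorted2 (PySem.Dict.ofList adict).items Prod.fst Prod.snd).map
          Prod.fst).Nodup := by
        have h0 : ((PySem.Dict.ofList adict).items.map Prod.fst).Nodup :=
          PySem.Dict.nodup_keys_ofList adict
        exact ((hperm.map Prod.fst).nodup_iff).2 h0
      have hlt := pvPairwise_lt_of_le_of_nodup _
        (pvSorted2_pairwise_le (PySem.Dict.ofList adict).items) hnd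
      have hwhile := pvAWhile_eq (PySem.Dict.ofList adict) hlt suf
        (PySem.Dict.ofList adict).size [] temp (by simpa using hse)
        (by unfold PySem.Dict.size; omega)
      rw [hse]
      show temp :: pvAWhile (PySem.Dict.ofList adict) (PySem.Dict.ofList adict).size temp
        = temp :: suf
      rw [hwhile]
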